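-- pv_equiv track=rewrite | github.com/shidashaowang-pixel/go-app | backend/go_rules.py | count_territory
-- ===== SOURCE A (Python) =====
-- BOARD_SIZE = 19  # 默认19路，可修改为9或13
--
-- DIRS = [(-1, 0), (1, 0), (0, -1), (0, 1)]
--
-- def get_neighbors(x, y, size=BOARD_SIZE):
--     """获取相邻位置"""
--     for dx, dy in DIRS:
--         nx, ny = x + dx, y + dy
--         if 0 <= nx < size and 0 <= ny < size:
--             yield nx, ny
--
-- def count_territory(board, size=BOARD_SIZE):
--     """
--     中国规则领地计算
--     空点如果只被一方棋子包围，则为该方领地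
--     返回 (黑地, 白地, 中立地)
--     """
--     visited = set()
--     black_territory = 0
--     white_territory = 0
--
--     for y in range(size):
--         for x in range(size):
--             if board[y][x] != 0 or (x, y) in visited:
--                 continue
--
--             # BFS找到连通的空区域
--             empty_group = set()
--             adjacent_colors = set()
--             stack = [(x, y)]
--
--             while stack:
--                 cx, cy = stack.pop()
--                 if (cx, cy) in visited or (cx, cy) in empty_group:
--                     continue
--
--                 if board[cy][cx] != 0:
--                     adjacent_colors.add(board[cy][cx])
--                     continue
--
--                 empty_group.add((cx, cy))
--                 visited.add((cx, cy))
--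
--                 for nx, ny in get_neighbors(cx, cy, size):
--                     if (nx, ny) not in visited and (nx, ny) not in empty_group:
--                         stack.append((nx, ny))
--
--             # 判断空区域归属
--             if adjacent_colors == {1}:
--                 black_territory += len(empty_group)
--             elif adjacent_colors == {2}:
--                 white_territory += len(empty_group)
--             # 否则是中立地，不计分
--
--     return black_territory, white_territory
-- ===== SOURCE B (Python) =====
-- BOARD_SIZE = 19
--
-- def count_territory(board, size=BOARD_SIZE):
--     def neighbors(x, y):
--         return [(x - 1, y), (x + 1, y), (x, y - 1), (x, y + 1)]
--
--     def is_empty(q):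
--         qx, qy = q
--         return 0 <= qx < size and 0 <= qy < size and board[qy][qx] == 0
--
--     def region_of(p):
--         # level-set closure: grow the region one frontier ring at a time
--         reg = {p}
--         frontier = [p]
--         while frontier:
--             new = []
--             for (cx, cy) in frontier:
--                 for q in neighbors(cx, cy):
--                     if is_empty(q) and q not in reg and q not in new:
--                         new.append(q)
--             reg |= set(new)
--             frontier = new
--         return reg
--
--     black = 0
--     white = 0
--     for y in range(size):
--         for x in range(size):
--             if board[y][x] != 0:
--                 continue
--             colors = {board[ny][nx]
--                       for (cx, cy) in region_of((x, y))
--                       for (nx, ny) in neighbors(cx, cy)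
--                       if 0 <= nx < size and 0 <= ny < size and board[ny][nx] != 0}
--             if colors == {1}:
--                 black += 1
--             elif colors == {2}:
--                 white += 1
--     return black, white
-- ===== Notes on version B (the rewrite author's own statement) =====
-- stated objective: alternative
-- what changed: A runs one stack-based DFS flood fill per region with a global visited set and adds the region's size in bulk; B classifies each empty cell independently by growing its region as frontier level-sets (breadth-first rings, no global visited state) and counts +1 per cell.
import Mathlib
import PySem

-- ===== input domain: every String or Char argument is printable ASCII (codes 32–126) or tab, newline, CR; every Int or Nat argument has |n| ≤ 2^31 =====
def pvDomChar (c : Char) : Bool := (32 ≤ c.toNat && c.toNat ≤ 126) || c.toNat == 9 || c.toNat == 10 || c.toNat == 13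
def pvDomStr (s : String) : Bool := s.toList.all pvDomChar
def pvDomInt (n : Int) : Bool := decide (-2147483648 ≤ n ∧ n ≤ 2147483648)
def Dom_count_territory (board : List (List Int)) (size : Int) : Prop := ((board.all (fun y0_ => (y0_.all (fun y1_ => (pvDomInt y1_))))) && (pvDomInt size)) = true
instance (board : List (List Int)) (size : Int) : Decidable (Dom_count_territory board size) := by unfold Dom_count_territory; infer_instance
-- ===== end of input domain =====

-- B replaces A's stack-DFS with a global visited set by an independent per-cell
-- level-set (frontier) closure plus a per-cell +1 count (objective: alternative).

-- ===== PORT A =====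
-- board[y][x] (indices are in range under Pre_count_territory)
def ctVal (board : List (List Int)) (x y : Int) : Int :=
  PySem.List.pyGetD (PySem.List.pyGetD board y []) x 0

-- get_neighbors(x, y, size): DIRS order (-1,0),(1,0),(0,-1),(0,1), bounds-filtered
def ctNbrsA (x y size : Int) : List (Int × Int) :=
  ([(x - 1, y), (x + 1, y), (x, y - 1), (x, y + 1)]).filter
    (fun q => decide (0 ≤ q.1) && decide (q.1 < size) && decide (0 ≤ q.2) && decide (q.2 < size))

-- the 'while stack:' BFS of A; stack.pop() takes the LAST element; fuel is only a
-- totality device (proved sufficient below). Returns (empty_group, adjacent_colors, visited).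
def ctBFS (board : List (List Int)) (size : Int) :
    Nat → PySem.Set (Int × Int) → PySem.Set (Int × Int) → PySem.Set Int → List (Int × Int) →
    PySem.Set (Int × Int) × PySem.Set Int × PySem.Set (Int × Int)
  | 0, visited, group, colors, _ => (group, colors, visited)
  | fuel + 1, visited, group, colors, stack =>
    match stack.getLast? with
    | none => (group, colors, visited)
    | some c =>
      let rest := stack.dropLast
      if PySem.Set.contains visited c || PySem.Set.contains group c then
        ctBFS board size fuel visited group colors rest
      else if !(ctVal board c.1 c.2 == 0) then
        ctBFS board size fuel visited group (PySem.Set.add colors (ctVal board c.1 c.2)) rest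
      else
        let group' := PySem.Set.add group c
        let visited' := PySem.Set.add visited c
        let pushes := (ctNbrsA c.1 c.2 size).filter
          (fun q => !(PySem.Set.contains visited' q) && !(PySem.Set.contains group' q))
        ctBFS board size fuel visited' group' colors (rest ++ pushes)

def count_territory (board : List (List Int)) (size : Int) : Int × Int :=
  let res := (PySem.List.pyRange 0 size 1).foldl (fun st y =>
    (PySem.List.pyRange 0 size 1).foldl (fun st x =>
      if !(ctVal board x y == 0) || PySem.Set.contains st.1 (x, y) then st
      else
        let r := ctBFS board size (5 * (size.toNat * size.toNat) + 2) st.1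
                   PySem.Set.empty PySem.Set.empty [(x, y)]
        if PySem.Set.equal r.2.1 [1] then (r.2.2, st.2.1 + PySem.Set.len r.1, st.2.2)
        else if PySem.Set.equal r.2.1 [2] then (r.2.2, st.2.1, st.2.2 + PySem.Set.len r.1)
        else (r.2.2, st.2.1, st.2.2)) st)
    ((PySem.Set.empty : PySem.Set (Int × Int)), (0 : Int), (0 : Int))
  (res.2.1, res.2.2)

-- ===== PORT B =====
def ctValB (board : List (List Int)) (x y : Int) : Int :=
  PySem.List.pyGetD (PySem.List.pyGetD board y []) x 0

-- neighbors(x, y): the raw 4-list, no bounds filter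
def ctNbrsB (x y : Int) : List (Int × Int) :=
  [(x - 1, y), (x + 1, y), (x, y - 1), (x, y + 1)]

-- is_empty(q)
def ctEmptyB (board : List (List Int)) (size : Int) (q : Int × Int) : Bool :=
  decide (0 ≤ q.1) && decide (q.1 < size) && decide (0 ≤ q.2) && decide (q.2 < size) &&
    (ctValB board q.1 q.2 == 0)

-- region_of: grow the region one frontier ring at a time; fuel is only a totality
-- device (proved sufficient below)
def ctGrow (board : List (List Int)) (size : Int) :
    Nat → PySem.Set (Int × Int) → List (Int × Int) → PySem.Set (Int × Int)
  | 0, reg, _ => reg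
  | fuel + 1, reg, frontier =>
    match frontier with
    | [] => reg
    | _ :: _ =>
      let new := frontier.foldl (fun acc c =>
        (ctNbrsB c.1 c.2).foldl (fun acc q =>
          if ctEmptyB board size q && !(PySem.Set.contains reg q) && !(acc.contains q)
          then acc ++ [q] else acc) acc) []
      ctGrow board size fuel (PySem.Set.update reg new) new

def count_territory_alt (board : List (List Int)) (size : Int) : Int × Int :=
  (PySem.List.pyRange 0 size 1).foldl (fun st y =>
    (PySem.List.pyRange 0 size 1).foldl (fun st x =>
      if !(ctValB board x y == 0) then st
      else
        let reg := ctGrow board size (size.toNat * size.toNat + 1) [(x, y)] [(x, y)]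
        let colors : PySem.Set Int := reg.foldl (fun cs c =>
          (ctNbrsB c.1 c.2).foldl (fun cs q =>
            if decide (0 ≤ q.1) && decide (q.1 < size) && decide (0 ≤ q.2) &&
                 decide (q.2 < size) && !(ctValB board q.1 q.2 == 0)
            then PySem.Set.add cs (ctValB board q.1 q.2) else cs) cs) PySem.Set.empty
        if PySem.Set.equal colors [1] then (st.1 + 1, st.2)
        else if PySem.Set.equal colors [2] then (st.1, st.2 + 1)
        else st) st)
    ((0 : Int), (0 : Int))

-- ===== PRECONDITION & SPEC =====
-- Pre_ excludes exactly the inputs where Python A raises IndexError: some board[y][x]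
-- with 0 ≤ x, y < size is missing.
def Pre_count_territory (board : List (List Int)) (size : Int) : Prop :=
  size ≤ (board.length : Int) ∧ ∀ row ∈ board.take size.toNat, size ≤ (row.length : Int)
instance (board : List (List Int)) (size : Int) : Decidable (Pre_count_territory board size) := by
  unfold Pre_count_territory; infer_instance

def pvWitness_count_territory : List (List Int) × Int := ([[0, 1], [1, 0]], 2)

def Spec_count_territory (board : List (List Int)) (size : Int) (out : Int × Int) : Prop := out = count_territory_alt board size
instance (board : List (List Int)) (size : Int) (out : Int × Int) : Decidable (Spec_count_territory board size out) := by unfold Spec_count_territory; infer_instance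

-- ===== CLAIM (what is proved, stated in full; the proofs are below) =====
def Claim_equal_count_territory : Prop := ∀ (board : List (List Int)) (size : Int), Dom_count_territory board size → Pre_count_territory board size → Spec_count_territory board size (count_territory board size)

-- ===== LEMMAS AND PROOFS =====

-- -- abstract notions: grid membership, emptiness, adjacency, reachability, adjacent colors
def ctInG (size : Int) (p : Int × Int) : Prop := 0 ≤ p.1 ∧ p.1 < size ∧ 0 ≤ p.2 ∧ p.2 < size

def ctEmp (board : List (List Int)) (size : Int) (p : Int × Int) : Prop :=
  ctInG size p ∧ ctVal board p.1 p.2 = 0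

def ctStep (board : List (List Int)) (size : Int) (p q : Int × Int) : Prop :=
  ctEmp board size p ∧ ctEmp board size q ∧ q ∈ ctNbrsB p.1 p.2

def ctReach (board : List (List Int)) (size : Int) : (Int × Int) → (Int × Int) → Prop :=
  Relation.ReflTransGen (ctStep board size)

def ctAdjCol (board : List (List Int)) (size : Int) (s : Int × Int) (v : Int) : Prop :=
  ∃ g, ctReach board size s g ∧ ∃ r ∈ ctNbrsB g.1 g.2,
    ctInG size r ∧ ctVal board r.1 r.2 ≠ 0 ∧ ctVal board r.1 r.2 = v

def ctMono (board : List (List Int)) (size : Int) (s : Int × Int) (c : Int) : Prop :=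
  ∀ v, ctAdjCol board size s v ↔ v = c

noncomputable def ctIndic (P : Prop) : Bool := @decide P (Classical.propDecidable P)

noncomputable def ctCnt (board : List (List Int)) (size : Int) (c : Int) (l : List (Int × Int)) : Nat :=
  l.countP (fun p => ctIndic (ctMono board size p c))

noncomputable def ctCntE (board : List (List Int)) (size : Int) (c : Int) (l : List (Int × Int)) : Nat :=
  l.countP (fun p => ctIndic (ctEmp board size p ∧ ctMono board size p c))

noncomputable def ctGrid (size : Int) : Finset (Int × Int) := Finset.Icc 0 (size - 1) ×ˢ Finset.Icc 0 (size - 1)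

def ctScan (n : Int) : List (Int × Int) :=
  (PySem.List.pyRange 0 n 1).flatMap (fun y => (PySem.List.pyRange 0 n 1).map (fun x => (x, y)))

theorem ctIndic_iff (P : Prop) : ctIndic P = true ↔ P := by simp [ctIndic]

theorem ctIndic_true {P : Prop} (h : P) : ctIndic P = true := (ctIndic_iff P).mpr h

theorem ctIndic_false {P : Prop} (h : ¬ P) : ctIndic P = false := by
  have := (ctIndic_iff P)
  cases hb : ctIndic P
  · rfl
  · exact absurd (this.mp hb) h

theorem ctValB_eq : ctValB = ctVal := rfl

theorem ctEmptyB_iff (board : List (List Int)) (size : Int) (q : Int × Int) :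
    ctEmptyB board size q = true ↔ ctEmp board size q := by
  simp [ctEmptyB, ctEmp, ctInG, ctValB, ctVal]
  tauto

theorem ctNbrsB_symm {p q : Int × Int} (h : q ∈ ctNbrsB p.1 p.2) : p ∈ ctNbrsB q.1 q.2 := by
  obtain ⟨px, py⟩ := p; obtain ⟨qx, qy⟩ := q
  simp [ctNbrsB, Prod.ext_iff] at h ⊢
  omega

theorem ctStep_symm (board : List (List Int)) (size : Int) : Symmetric (ctStep board size) := by
  rintro p q ⟨hp, hq, hn⟩
  exact ⟨hq, hp, ctNbrsB_symm hn⟩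

theorem ctReach_symm (board : List (List Int)) (size : Int) : Symmetric (ctReach board size) := Relation.ReflTransGen.symmetric (ctStep_symm board size)

theorem ctReach_emp {board : List (List Int)} {size : Int} {s q : Int × Int}
    (hs : ctEmp board size s) (h : ctReach board size s q) : ctEmp board size q := by
  induction h with
  | refl => exact hs
  | tail _ hstep _ => exact hstep.2.1

-- a set containing s and closed under ctStep contains everything reachable from s
theorem ctClosed_reach {board : List (List Int)} {size : Int} {S : (Int × Int) → Prop} {s q : Int × Int}
    (hsS : S s) (hcl : ∀ p, S p → ∀ q, ctStep board size p q → S q)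
    (h : ctReach board size s q) : S q := by
  induction h with
  | refl => exact hsS
  | tail _ hstep ih => exact hcl _ ih _ hstep

theorem ctReach_not_mem_closed {board : List (List Int)} {size : Int} {V : List (Int × Int)}
    {s q : Int × Int} (hcl : ∀ p ∈ V, ∀ r, ctStep board size p r → r ∈ V)
    (hsV : s ∉ V) (h : ctReach board size s q) : q ∉ V := by
  intro hq
  exact hsV (ctClosed_reach (S := fun r => r ∈ V) hq (fun p hp r hr => hcl p hp r hr)
    (ctReach_symm board size h))

theorem ctAdjCol_congr {board : List (List Int)} {size : Int} {s p : Int × Int}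
    (h : ctReach board size s p) (v : Int) :
    ctAdjCol board size s v ↔ ctAdjCol board size p v := by
  constructor
  · rintro ⟨g, hg, hr⟩
    exact ⟨g, Relation.ReflTransGen.trans (ctReach_symm board size h) hg, hr⟩
  · rintro ⟨g, hg, hr⟩
    exact ⟨g, Relation.ReflTransGen.trans h hg, hr⟩

theorem ctMono_congr {board : List (List Int)} {size : Int} {s p : Int × Int}
    (h : ctReach board size s p) (c : Int) :
    ctMono board size s c ↔ ctMono board size p c := by
  unfold ctMono
  exact forall_congr' (fun v => iff_congr (ctAdjCol_congr h v) Iff.rfl)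

theorem ctMono_not_both {board : List (List Int)} {size : Int} {s : Int × Int}
    (h1 : ctMono board size s 1) (h2 : ctMono board size s 2) : False := by
  have h := (h2 1).mp ((h1 1).mpr rfl)
  norm_num at h

-- grid facts
theorem ctGrid_mem (size : Int) (p : Int × Int) : p ∈ ctGrid size ↔ ctInG size p := by
  simp [ctGrid, Finset.mem_product, Finset.mem_Icc, ctInG]
  omega

theorem ctGrid_card (size : Int) : (ctGrid size).card = size.toNat * size.toNat := by
  rw [ctGrid, Finset.card_product, Int.card_Icc]
  norm_num

-- scan list facts
theorem ctScan_eq (size : Int) {σ : Type} (f : σ → Int → Int → σ) (init : σ) :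
    (PySem.List.pyRange 0 size 1).foldl (fun st y =>
      (PySem.List.pyRange 0 size 1).foldl (fun st x => f st x y) st) init
    = (ctScan size).foldl (fun st p => f st p.1 p.2) init := by
  simp [ctScan, List.foldl_flatMap, List.foldl_map]

theorem ctScan_mem (size : Int) (p : Int × Int) : p ∈ ctScan size ↔ ctInG size p := by
  simp only [ctScan, List.mem_flatMap, List.mem_map, PySem.List.mem_pyRange_one, ctInG]
  constructor
  · rintro ⟨y, ⟨hy0, hy1⟩, x, ⟨hx0, hx1⟩, rfl⟩
    exact ⟨hx0, hx1, hy0, hy1⟩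
  · rintro ⟨h1, h2, h3, h4⟩
    exact ⟨p.2, ⟨h3, h4⟩, p.1, ⟨h1, h2⟩, rfl⟩

theorem ctScan_nodup (size : Int) : (ctScan size).Nodup := by
  rw [ctScan, List.nodup_flatMap]
  refine ⟨fun y _ => ?_, ?_⟩
  · exact (PySem.List.nodup_pyRange_one 0 size).map (fun a b h => by simpa using h)
  · refine (PySem.List.nodup_pyRange_one 0 size).imp ?_
    intro a b hab
    simp only [Function.onFun, List.disjoint_left, List.mem_map]
    rintro p ⟨x, _, rfl⟩ ⟨x', _, h⟩
    exact hab (by simpa using (Prod.ext_iff.mp h).2.symm)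

-- Set.equal against a singleton
theorem ctEqual_one_iff {board : List (List Int)} {size : Int} {s : Int × Int} (c : Int)
    (colors : PySem.Set Int) (hmem : ∀ v, v ∈ colors ↔ ctAdjCol board size s v) :
    PySem.Set.equal colors [c] = true ↔ ctMono board size s c := by
  rw [PySem.Set.equal_iff]
  unfold ctMono
  constructor
  · intro h v
    have := h v
    simp only [hmem, List.mem_singleton] at this
    exact this
  · intro h v
    have := h v
    simp only [hmem, List.mem_singleton]
    exact this

-- ===== the B side: region growth =====

theorem ctNewInner (board : List (List Int)) (size : Int) (reg : PySem.Set (Int × Int))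
    (ns : List (Int × Int)) :
    ∀ acc : List (Int × Int), acc.Nodup →
    (ns.foldl (fun acc q =>
        if ctEmptyB board size q && !(PySem.Set.contains reg q) && !(acc.contains q)
        then acc ++ [q] else acc) acc).Nodup ∧
    ∀ q, q ∈ ns.foldl (fun acc q =>
        if ctEmptyB board size q && !(PySem.Set.contains reg q) && !(acc.contains q)
        then acc ++ [q] else acc) acc
      ↔ q ∈ acc ∨ (q ∈ ns ∧ ctEmp board size q ∧ q ∉ reg) := by
  induction ns with
  | nil => intro acc hacc; simp [hacc]
  | cons n ns ih =>
    intro acc hacc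
    simp only [List.foldl_cons]
    by_cases hb : (ctEmptyB board size n && !(PySem.Set.contains reg n) && !(acc.contains n)) = true
    · have hb' := hb
      simp only [Bool.and_eq_true, Bool.not_eq_true'] at hb'
      obtain ⟨⟨he, hreg⟩, haccn⟩ := hb'
      have hnacc : n ∉ acc := by
        intro h; rw [List.contains_eq_mem, decide_eq_false_iff_not] at haccn; exact haccn h
      have hnreg : n ∉ reg := by
        intro h
        rw [show PySem.Set.contains reg n = List.contains reg n from rfl,
          List.contains_eq_mem, decide_eq_false_iff_not] at hreg
        exact hreg h
      have hemp : ctEmp board size n := (ctEmptyB_iff board size n).mp he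
      have hnd : (acc ++ [n]).Nodup := by
        refine hacc.append (List.nodup_singleton n) ?_
        intro x hx hx2
        simp only [List.mem_singleton] at hx2
        subst hx2; exact hnacc hx
      rw [if_pos hb]
      obtain ⟨ihnd, ihmem⟩ := ih (acc ++ [n]) hnd
      refine ⟨ihnd, fun q => ?_⟩
      rw [ihmem q]
      simp only [List.mem_append, List.mem_cons, List.not_mem_nil, or_false]
      constructor
      · rintro ((h | rfl) | h)
        · exact Or.inl h
        · exact Or.inr ⟨Or.inl rfl, hemp, hnreg⟩
        · exact Or.inr ⟨Or.inr h.1, h.2⟩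
      · rintro (h | ⟨(rfl | h), h2, h3⟩)
        · exact Or.inl (Or.inl h)
        · exact Or.inl (Or.inr rfl)
        · exact Or.inr ⟨h, h2, h3⟩
    · rw [if_neg hb]
      obtain ⟨ihnd, ihmem⟩ := ih acc hacc
      refine ⟨ihnd, fun q => ?_⟩
      rw [ihmem q]
      simp only [List.mem_cons]
      constructor
      · rintro (h | h)
        · exact Or.inl h
        · exact Or.inr ⟨Or.inr h.1, h.2⟩
      · rintro (h | ⟨(rfl | h), h2, h3⟩)
        · exact Or.inl h
        · by_cases hacc' : q ∈ acc
          · exact Or.inl hacc'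
          · exfalso
            apply hb
            simp only [Bool.and_eq_true, Bool.not_eq_true']
            refine ⟨⟨(ctEmptyB_iff board size q).mpr h2, ?_⟩, ?_⟩
            · rw [show PySem.Set.contains reg q = List.contains reg q from rfl,
                List.contains_eq_mem, decide_eq_false_iff_not]
              exact h3
            · rw [List.contains_eq_mem, decide_eq_false_iff_not]
              exact hacc'
        · exact Or.inr ⟨h, h2, h3⟩

theorem ctNew_spec (board : List (List Int)) (size : Int) (reg : PySem.Set (Int × Int))
    (l : List (Int × Int)) (acc : List (Int × Int)) (hacc : acc.Nodup) :
    (l.foldl (fun acc c =>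
        (ctNbrsB c.1 c.2).foldl (fun acc q =>
          if ctEmptyB board size q && !(PySem.Set.contains reg q) && !(acc.contains q)
          then acc ++ [q] else acc) acc) acc).Nodup ∧
    ∀ q, q ∈ (l.foldl (fun acc c =>
        (ctNbrsB c.1 c.2).foldl (fun acc q =>
          if ctEmptyB board size q && !(PySem.Set.contains reg q) && !(acc.contains q)
          then acc ++ [q] else acc) acc) acc)
      ↔ q ∈ acc ∨ (ctEmp board size q ∧ q ∉ reg ∧ ∃ c ∈ l, q ∈ ctNbrsB c.1 c.2) := by
  induction l generalizing acc with
  | nil => simp [hacc]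
  | cons c l ih =>
    simp only [List.foldl_cons]
    obtain ⟨hnd, hmem⟩ := ctNewInner board size reg (ctNbrsB c.1 c.2) acc hacc
    obtain ⟨ihnd, ihmem⟩ := ih _ hnd
    refine ⟨ihnd, fun q => ?_⟩
    rw [ihmem q, hmem q]
    simp only [List.mem_cons]
    constructor
    · rintro ((h | ⟨h1, h2, h3⟩) | ⟨h1, h2, c', hc', hn⟩)
      · exact Or.inl h
      · exact Or.inr ⟨h2, h3, c, Or.inl rfl, h1⟩
      · exact Or.inr ⟨h1, h2, c', Or.inr hc', hn⟩
    · rintro (h | ⟨h1, h2, c', (rfl | hc'), hn⟩)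
      · exact Or.inl (Or.inl h)
      · exact Or.inl (Or.inr ⟨hn, h1, h2⟩)
      · exact Or.inr ⟨h1, h2, c', hc', hn⟩

theorem ctGrow_nil (board : List (List Int)) (size : Int) (fuel : Nat) (reg : PySem.Set (Int × Int)) :
    ctGrow board size fuel reg [] = reg := by
  cases fuel <;> rfl

def ctNewF (board : List (List Int)) (size : Int) (reg : PySem.Set (Int × Int))
    (frontier : List (Int × Int)) : List (Int × Int) :=
  frontier.foldl (fun acc c =>
    (ctNbrsB c.1 c.2).foldl (fun acc q =>
      if ctEmptyB board size q && !(PySem.Set.contains reg q) && !(acc.contains q)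
      then acc ++ [q] else acc) acc) []

theorem ctGrow_cons (board : List (List Int)) (size : Int) (fuel : Nat)
    (reg : PySem.Set (Int × Int)) (f : Int × Int) (fs : List (Int × Int)) :
    ctGrow board size (fuel + 1) reg (f :: fs) =
    ctGrow board size fuel (PySem.Set.update reg (ctNewF board size reg (f :: fs)))
      (ctNewF board size reg (f :: fs)) := rfl

theorem ctNewF_spec (board : List (List Int)) (size : Int) (reg : PySem.Set (Int × Int))
    (frontier : List (Int × Int)) :
    (ctNewF board size reg frontier).Nodup ∧
    ∀ q, q ∈ ctNewF board size reg frontier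
      ↔ ctEmp board size q ∧ q ∉ reg ∧ ∃ c ∈ frontier, q ∈ ctNbrsB c.1 c.2 := by
  obtain ⟨hnd, hmem⟩ := ctNew_spec board size reg frontier [] List.nodup_nil
  refine ⟨hnd, fun q => ?_⟩
  rw [ctNewF, hmem q]
  simp only [List.not_mem_nil, false_or]

theorem ctGrow_spec (board : List (List Int)) (size : Int) (s : Int × Int)
    (hs : ctEmp board size s) :
    ∀ (fuel : Nat) (reg : PySem.Set (Int × Int)) (frontier : List (Int × Int)),
    reg.Nodup → (∀ p ∈ reg, ctReach board size s p) → s ∈ reg →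
    (∀ p ∈ frontier, p ∈ reg) →
    (∀ g ∈ reg, g ∉ frontier → ∀ q, ctStep board size g q → q ∈ reg) →
    ((ctGrid size).filter (fun p => ctEmptyB board size p = true ∧ p ∉ reg)).card < fuel →
    (ctGrow board size fuel reg frontier).Nodup ∧
    (∀ q, q ∈ ctGrow board size fuel reg frontier ↔ ctReach board size s q) := by
  intro fuel
  induction fuel with
  | zero => intro reg frontier _ _ _ _ _ hcard; omega
  | succ fuel ih =>
    intro reg frontier hnd hreach hsreg hsub hcl hcard
    cases frontier with
    | nil =>
      rw [ctGrow_nil]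
      refine ⟨hnd, fun q => ⟨fun h => hreach q h, fun h => ?_⟩⟩
      exact ctClosed_reach (S := fun r => r ∈ reg) hsreg
        (fun p hp r hr => hcl p hp (by simp) r hr) h
    | cons f fs =>
      rw [ctGrow_cons]
      obtain ⟨hnnd, hnmem⟩ := ctNewF_spec board size reg (f :: fs)
      have hdisj : ∀ x ∈ ctNewF board size reg (f :: fs), x ∉ reg :=
        fun x hx => ((hnmem x).mp hx).2.1
      have hupd : PySem.Set.update reg (ctNewF board size reg (f :: fs))
          = reg ++ ctNewF board size reg (f :: fs) :=
        PySem.Set.update_eq_append_of_disjoint reg _ hnnd hdisj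
      -- any frontier member is an empty reachable cell
      have hfemp : ∀ c ∈ f :: fs, ctEmp board size c :=
        fun c hc => ctReach_emp hs (hreach c (hsub c hc))
      -- the grown region again satisfies the invariants
      have hnd' : (PySem.Set.update reg (ctNewF board size reg (f :: fs))).Nodup := by
        rw [hupd]
        exact hnd.append hnnd (fun x hx hx2 => hdisj x hx2 hx)
      have hreach' : ∀ p ∈ PySem.Set.update reg (ctNewF board size reg (f :: fs)),
          ctReach board size s p := by
        rw [hupd]
        intro p hp
        rcases List.mem_append.mp hp with h | h
        · exact hreach p h
        · obtain ⟨hemp, hnreg, c, hc, hnb⟩ := (hnmem p).mp h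
          exact Relation.ReflTransGen.tail (hreach c (hsub c hc)) ⟨hfemp c hc, hemp, hnb⟩
      have hsreg' : s ∈ PySem.Set.update reg (ctNewF board size reg (f :: fs)) := by
        rw [hupd]; exact List.mem_append.mpr (Or.inl hsreg)
      have hsub' : ∀ p ∈ ctNewF board size reg (f :: fs),
          p ∈ PySem.Set.update reg (ctNewF board size reg (f :: fs)) := by
        rw [hupd]; intro p hp; exact List.mem_append.mpr (Or.inr hp)
      have hcl' : ∀ g ∈ PySem.Set.update reg (ctNewF board size reg (f :: fs)),
          g ∉ ctNewF board size reg (f :: fs) →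
          ∀ q, ctStep board size g q → q ∈ PySem.Set.update reg (ctNewF board size reg (f :: fs)) := by
        rw [hupd]
        intro g hg hgn q hstep
        rcases List.mem_append.mp hg with hgreg | hgnew
        · by_cases hgf : g ∈ f :: fs
          · by_cases hq : q ∈ reg
            · exact List.mem_append.mpr (Or.inl hq)
            · refine List.mem_append.mpr (Or.inr ?_)
              exact (hnmem q).mpr ⟨hstep.2.1, hq, g, hgf, hstep.2.2⟩
          · exact List.mem_append.mpr (Or.inl (hcl g hgreg hgf q hstep))
        · exact absurd hgnew hgn
      by_cases hnew : ctNewF board size reg (f :: fs) = []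
      · have hclosed : ∀ p ∈ reg, ∀ q, ctStep board size p q → q ∈ reg := by
          intro p hp q hq
          by_cases hpf : p ∈ f :: fs
          · by_cases hqr : q ∈ reg
            · exact hqr
            · exfalso
              have hmem : q ∈ ctNewF board size reg (f :: fs) :=
                (hnmem q).mpr ⟨hq.2.1, hqr, p, hpf, hq.2.2⟩
              rw [hnew] at hmem
              simp at hmem
          · exact hcl p hp hpf q hq
        rw [hnew, ctGrow_nil, PySem.Set.update_nil]
        exact ⟨hnd, fun q => ⟨hreach q, fun h => ctClosed_reach (S := (· ∈ reg)) hsreg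
          (fun p hp r hr => hclosed p hp r hr) h⟩⟩
      · -- the region strictly grew: the free-cell count drops
        obtain ⟨n, hn⟩ := List.exists_mem_of_ne_nil _ hnew
        have hfree : ((ctGrid size).filter (fun p => ctEmptyB board size p = true ∧
            p ∉ PySem.Set.update reg (ctNewF board size reg (f :: fs)))).card
            < ((ctGrid size).filter (fun p => ctEmptyB board size p = true ∧ p ∉ reg)).card := by
          apply Finset.card_lt_card
          constructor
          · intro p hp
            rw [Finset.mem_filter] at hp ⊢
            refine ⟨hp.1, hp.2.1, fun hpr => hp.2.2 ?_⟩
            rw [hupd]; exact List.mem_append.mpr (Or.inl hpr)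
          · intro hss
            obtain ⟨hemp, hnreg, _⟩ := (hnmem n).mp hn
            have hn1 : n ∈ (ctGrid size).filter (fun p => ctEmptyB board size p = true ∧ p ∉ reg) := by
              rw [Finset.mem_filter, ctGrid_mem]
              exact ⟨hemp.1, (ctEmptyB_iff board size n).mpr hemp, hnreg⟩
            have hn2 := hss hn1
            rw [Finset.mem_filter] at hn2
            exact hn2.2.2 (hsub' n hn)
        exact ih _ _ hnd' hreach' hsreg' hsub' hcl' (by omega)

theorem ctColorsInner (board : List (List Int)) (size : Int) (ns : List (Int × Int)) :
    ∀ cs : PySem.Set Int, cs.Nodup →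
    (ns.foldl (fun cs q =>
        if decide (0 ≤ q.1) && decide (q.1 < size) && decide (0 ≤ q.2) &&
             decide (q.2 < size) && !(ctValB board q.1 q.2 == 0)
        then PySem.Set.add cs (ctValB board q.1 q.2) else cs) cs).Nodup ∧
    ∀ v, v ∈ ns.foldl (fun cs q =>
        if decide (0 ≤ q.1) && decide (q.1 < size) && decide (0 ≤ q.2) &&
             decide (q.2 < size) && !(ctValB board q.1 q.2 == 0)
        then PySem.Set.add cs (ctValB board q.1 q.2) else cs) cs
      ↔ v ∈ cs ∨ ∃ r ∈ ns, ctInG size r ∧ ctVal board r.1 r.2 ≠ 0 ∧ ctVal board r.1 r.2 = v := by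
  induction ns with
  | nil => intro cs hcs; simp [hcs]
  | cons r ns ih =>
    intro cs hcs
    simp only [List.foldl_cons]
    by_cases hb : (decide (0 ≤ r.1) && decide (r.1 < size) && decide (0 ≤ r.2) &&
        decide (r.2 < size) && !(ctValB board r.1 r.2 == 0)) = true
    · have hb' := hb
      simp only [Bool.and_eq_true, decide_eq_true_eq, Bool.not_eq_true', beq_eq_false_iff_ne] at hb'
      obtain ⟨⟨⟨⟨h1, h2⟩, h3⟩, h4⟩, h5⟩ := hb'
      rw [if_pos hb]
      obtain ⟨ihnd, ihmem⟩ := ih (PySem.Set.add cs (ctValB board r.1 r.2)) (PySem.Set.nodup_add cs _ hcs)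
      refine ⟨ihnd, fun v => ?_⟩
      rw [ihmem v]
      rw [PySem.Set.mem_add]
      simp only [List.mem_cons]
      constructor
      · rintro ((h | rfl) | ⟨r', hr', hg⟩)
        · exact Or.inl h
        · exact Or.inr ⟨r, Or.inl rfl, ⟨h1, h2, h3, h4⟩, h5, rfl⟩
        · exact Or.inr ⟨r', Or.inr hr', hg⟩
      · rintro (h | ⟨r', (rfl | hr'), hg⟩)
        · exact Or.inl (Or.inl h)
        · exact Or.inl (Or.inr hg.2.2.symm)
        · exact Or.inr ⟨r', hr', hg⟩
    · rw [if_neg hb]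
      obtain ⟨ihnd, ihmem⟩ := ih cs hcs
      refine ⟨ihnd, fun v => ?_⟩
      rw [ihmem v]
      simp only [List.mem_cons]
      constructor
      · rintro (h | ⟨r', hr', hg⟩)
        · exact Or.inl h
        · exact Or.inr ⟨r', Or.inr hr', hg⟩
      · rintro (h | ⟨r', (rfl | hr'), hg⟩)
        · exact Or.inl h
        · exfalso
          apply hb
          obtain ⟨⟨g1, g2, g3, g4⟩, g5, g6⟩ := hg
          simp only [Bool.and_eq_true, decide_eq_true_eq, Bool.not_eq_true', beq_eq_false_iff_ne]
          exact ⟨⟨⟨⟨g1, g2⟩, g3⟩, g4⟩, g5⟩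
        · exact Or.inr ⟨r', hr', hg⟩

theorem ctColors_spec (board : List (List Int)) (size : Int) (reg : List (Int × Int)) :
    ∀ (cs : PySem.Set Int), cs.Nodup →
    (reg.foldl (fun cs c =>
        (ctNbrsB c.1 c.2).foldl (fun cs q =>
          if decide (0 ≤ q.1) && decide (q.1 < size) && decide (0 ≤ q.2) &&
               decide (q.2 < size) && !(ctValB board q.1 q.2 == 0)
          then PySem.Set.add cs (ctValB board q.1 q.2) else cs) cs) cs).Nodup ∧
    ∀ v, v ∈ (reg.foldl (fun cs c =>
        (ctNbrsB c.1 c.2).foldl (fun cs q =>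
          if decide (0 ≤ q.1) && decide (q.1 < size) && decide (0 ≤ q.2) &&
               decide (q.2 < size) && !(ctValB board q.1 q.2 == 0)
          then PySem.Set.add cs (ctValB board q.1 q.2) else cs) cs) cs)
      ↔ v ∈ cs ∨ ∃ c ∈ reg, ∃ r ∈ ctNbrsB c.1 c.2,
          ctInG size r ∧ ctVal board r.1 r.2 ≠ 0 ∧ ctVal board r.1 r.2 = v := by
  induction reg with
  | nil => intro cs hcs; simp [hcs]
  | cons c reg ih =>
    intro cs hcs
    simp only [List.foldl_cons]
    obtain ⟨hnd, hmem⟩ := ctColorsInner board size (ctNbrsB c.1 c.2) cs hcs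
    obtain ⟨ihnd, ihmem⟩ := ih _ hnd
    refine ⟨ihnd, fun v => ?_⟩
    rw [ihmem v, hmem v]
    simp only [List.mem_cons]
    constructor
    · rintro ((h | ⟨r, hr, hg⟩) | ⟨c', hc', hg⟩)
      · exact Or.inl h
      · exact Or.inr ⟨c, Or.inl rfl, r, hr, hg⟩
      · exact Or.inr ⟨c', Or.inr hc', hg⟩
    · rintro (h | ⟨c', (rfl | hc'), hg⟩)
      · exact Or.inl (Or.inl h)
      · exact Or.inl (Or.inr hg)
      · exact Or.inr ⟨c', hc', hg⟩

-- ===== the A side: BFS =====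

theorem ctNbrsA_mem (x y size : Int) (q : Int × Int) :
    q ∈ ctNbrsA x y size ↔ q ∈ ctNbrsB x y ∧ ctInG size q := by
  simp [ctNbrsA, ctNbrsB, ctInG, List.mem_filter, and_assoc]

theorem ctNbrsA_len (x y size : Int) : (ctNbrsA x y size).length ≤ 4 := by
  have := List.length_filter_le
    (fun (q : Int × Int) => decide (0 ≤ q.1) && decide (q.1 < size) && decide (0 ≤ q.2) && decide (q.2 < size))
    [(x - 1, y), (x + 1, y), (x, y - 1), (x, y + 1)]
  simpa [ctNbrsA] using this

theorem ctBFS_concat (board : List (List Int)) (size : Int) (fuel : Nat)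
    (visited group : PySem.Set (Int × Int)) (colors : PySem.Set Int)
    (rest : List (Int × Int)) (c : Int × Int) :
    ctBFS board size (fuel + 1) visited group colors (rest ++ [c]) =
    (if PySem.Set.contains visited c || PySem.Set.contains group c then
      ctBFS board size fuel visited group colors rest
    else if !(ctVal board c.1 c.2 == 0) then
      ctBFS board size fuel visited group (PySem.Set.add colors (ctVal board c.1 c.2)) rest
    else
      ctBFS board size fuel (PySem.Set.add visited c) (PySem.Set.add group c) colors
        (rest ++ (ctNbrsA c.1 c.2 size).filter
          (fun q => !(PySem.Set.contains (PySem.Set.add visited c) q) &&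
                    !(PySem.Set.contains (PySem.Set.add group c) q)))) := by
  simp only [ctBFS, List.getLast?_concat, List.dropLast_concat]

theorem ctContains_iff {α : Type} [BEq α] [LawfulBEq α] (s : PySem.Set α) (x : α) :
    PySem.Set.contains s x = true ↔ x ∈ s := by
  rw [show PySem.Set.contains s x = List.contains s x from rfl, List.contains_eq_mem,
    decide_eq_true_iff]

theorem ctBFS_spec (board : List (List Int)) (size : Int) (s : Int × Int)
    (V0 : PySem.Set (Int × Int)) (hs : ctEmp board size s) (hsV : s ∉ V0)
    (hV0emp : ∀ p ∈ V0, ctEmp board size p)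
    (hV0cl : ∀ p ∈ V0, ∀ q, ctStep board size p q → q ∈ V0) :
    ∀ (fuel : Nat) (visited group : PySem.Set (Int × Int)) (colors : PySem.Set Int)
      (stack : List (Int × Int)),
    visited = V0 ++ group →
    group.Nodup → (∀ p ∈ group, p ∉ V0) →
    (∀ p ∈ group, ctEmp board size p ∧ ctReach board size s p) →
    (∀ e ∈ stack, e = s ∨ ∃ g ∈ group, e ∈ ctNbrsB g.1 g.2 ∧ ctInG size e) →
    (∀ g ∈ group, ∀ q, ctStep board size g q → q ∈ V0 ∨ q ∈ group ∨ q ∈ stack) →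
    (∀ v ∈ colors, ∃ g ∈ group, ∃ r ∈ ctNbrsB g.1 g.2,
        ctInG size r ∧ ctVal board r.1 r.2 = v ∧ v ≠ 0) →
    (∀ g ∈ group, ∀ r ∈ ctNbrsB g.1 g.2, ctInG size r → ctVal board r.1 r.2 ≠ 0 →
        (ctVal board r.1 r.2 ∈ colors ∨ r ∈ stack)) →
    (s ∈ group ∨ s ∈ stack) →
    colors.Nodup →
    stack.length + 5 * ((ctGrid size).filter
        (fun p => ctEmptyB board size p = true ∧ p ∉ V0 ∧ p ∉ group)).card < fuel →
    (ctBFS board size fuel visited group colors stack).2.2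
        = V0 ++ (ctBFS board size fuel visited group colors stack).1 ∧
    (ctBFS board size fuel visited group colors stack).1.Nodup ∧
    (∀ q, q ∈ (ctBFS board size fuel visited group colors stack).1 ↔ ctReach board size s q) ∧
    (∀ v, v ∈ (ctBFS board size fuel visited group colors stack).2.1 ↔ ctAdjCol board size s v) := by
  intro fuel
  induction fuel with
  | zero =>
    intro visited group colors stack _ _ _ _ _ _ _ _ _ _ hmu
    omega
  | succ fuel ih =>
    intro visited group colors stack hveq hgnd hgV0 hgrp hstk hcl hcolS hcolC hsg hcnd hmu
    have hvemp : ∀ p ∈ visited, ctEmp board size p := by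
      intro p hp
      rw [hveq, List.mem_append] at hp
      rcases hp with h | h
      · exact hV0emp p h
      · exact (hgrp p h).1
    rcases stack.eq_nil_or_concat' with rfl | ⟨rest, c, rfl⟩
    · -- stack empty: the BFS is complete
      show (group, colors, visited).2.2 = V0 ++ (group, colors, visited).1 ∧ _
      have hmemg : ∀ q, q ∈ group ↔ ctReach board size s q := by
        intro q
        constructor
        · exact fun h => (hgrp q h).2
        · intro h
          have hsgr : s ∈ group := by
            rcases hsg with h' | h'
            · exact h'
            · simp at h'
          have := ctClosed_reach (S := fun r => r ∈ V0 ∨ r ∈ group)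
            (Or.inr hsgr) (fun p hp r hr => by
              rcases hp with hp | hp
              · exact Or.inl (hV0cl p hp r hr)
              · rcases hcl p hp r hr with h | h | h
                · exact Or.inl h
                · exact Or.inr h
                · simp at h) h
          rcases this with hV | hg
          · exact absurd hV (ctReach_not_mem_closed hV0cl hsV h)
          · exact hg
      refine ⟨hveq, hgnd, hmemg, fun v => ?_⟩
      constructor
      · intro hv
        obtain ⟨g, hg, r, hr, hrin, hrval, hvne⟩ := hcolS v hv
        exact ⟨g, (hgrp g hg).2, r, hr, hrin, by rw [hrval]; exact hvne, hrval⟩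
      · rintro ⟨g, hg, r, hr, hrin, hrne, hrval⟩
        have hgmem : g ∈ group := (hmemg g).mpr hg
        rcases hcolC g hgmem r hr hrin hrne with h | h
        · rw [hrval] at h; exact h
        · simp at h
    · -- stack = rest ++ [c]
      rw [ctBFS_concat]
      by_cases h1 : (PySem.Set.contains visited c || PySem.Set.contains group c) = true
      · rw [if_pos h1]
        have hcv : c ∈ visited ∨ c ∈ group := by
          rcases Bool.or_eq_true_iff.mp h1 with h | h
          · exact Or.inl ((ctContains_iff visited c).mp h)
          · exact Or.inr ((ctContains_iff group c).mp h)
        have hcV0g : c ∈ V0 ∨ c ∈ group := by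
          rcases hcv with h | h
          · rw [hveq, List.mem_append] at h; exact h
          · exact Or.inr h
        apply ih visited group colors rest hveq hgnd hgV0 hgrp
        · exact fun e he => hstk e (List.mem_append.mpr (Or.inl he))
        · intro g hg q hq
          rcases hcl g hg q hq with h | h | h
          · exact Or.inl h
          · exact Or.inr (Or.inl h)
          · rcases List.mem_append.mp h with h | h
            · exact Or.inr (Or.inr h)
            · simp only [List.mem_singleton] at h
              subst h
              rcases hcV0g with h | h
              · exact Or.inl h
              · exact Or.inr (Or.inl h)
        · exact hcolS
        · intro g hg r hr hrin hrne
          rcases hcolC g hg r hr hrin hrne with h | h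
          · exact Or.inl h
          · rcases List.mem_append.mp h with h | h
            · exact Or.inr h
            · simp only [List.mem_singleton] at h
              subst h
              exfalso
              rcases hcv with h | h
              · exact hrne (hvemp r h).2
              · exact hrne (hgrp r h).1.2
        · rcases hsg with h | h
          · exact Or.inl h
          · rcases List.mem_append.mp h with h | h
            · exact Or.inr h
            · simp only [List.mem_singleton] at h
              subst h
              rcases hcV0g with h | h
              · exact absurd h hsV
              · exact Or.inl h
        · exact hcnd
        · simp only [List.length_append, List.length_singleton] at hmu
          omega
      · rw [if_neg h1]
        have hcnv : c ∉ visited ∧ c ∉ group := by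
          constructor
          · intro h
            exact h1 (Bool.or_eq_true_iff.mpr (Or.inl ((ctContains_iff visited c).mpr h)))
          · intro h
            exact h1 (Bool.or_eq_true_iff.mpr (Or.inr ((ctContains_iff group c).mpr h)))
        have hcstk := hstk c (List.mem_append.mpr (Or.inr (List.mem_singleton.mpr rfl)))
        by_cases h2 : (!(ctVal board c.1 c.2 == 0)) = true
        · rw [if_pos h2]
          have hcval : ctVal board c.1 c.2 ≠ 0 := by
            simpa using h2
          have hcns : c ≠ s := fun h => hcval (h ▸ hs.2)
          obtain ⟨g, hg, hnb, hin⟩ : ∃ g ∈ group, c ∈ ctNbrsB g.1 g.2 ∧ ctInG size c := by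
            rcases hcstk with h | h
            · exact absurd h hcns
            · exact h
          apply ih visited group (PySem.Set.add colors (ctVal board c.1 c.2)) rest
            hveq hgnd hgV0 hgrp
          · exact fun e he => hstk e (List.mem_append.mpr (Or.inl he))
          · intro g' hg' q hq
            rcases hcl g' hg' q hq with h | h | h
            · exact Or.inl h
            · exact Or.inr (Or.inl h)
            · rcases List.mem_append.mp h with h | h
              · exact Or.inr (Or.inr h)
              · simp only [List.mem_singleton] at h
                subst h
                exact absurd hq.2.1.2 hcval
          · intro v hv
            rw [PySem.Set.mem_add] at hv
            rcases hv with h | rfl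
            · exact hcolS v h
            · exact ⟨g, hg, c, hnb, hin, rfl, hcval⟩
          · intro g' hg' r hr hrin hrne
            rcases hcolC g' hg' r hr hrin hrne with h | h
            · exact Or.inl (by rw [PySem.Set.mem_add]; exact Or.inl h)
            · rcases List.mem_append.mp h with h | h
              · exact Or.inr h
              · simp only [List.mem_singleton] at h
                subst h
                exact Or.inl (by rw [PySem.Set.mem_add]; exact Or.inr rfl)
          · rcases hsg with h | h
            · exact Or.inl h
            · rcases List.mem_append.mp h with h | h
              · exact Or.inr h
              · simp only [List.mem_singleton] at h
                exact absurd h.symm hcns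
          · exact PySem.Set.nodup_add colors _ hcnd
          · simp only [List.length_append, List.length_singleton] at hmu
            omega
        · rw [if_neg h2]
          have hcval : ctVal board c.1 c.2 = 0 := by
            simpa using h2
          have hcin : ctInG size c := by
            rcases hcstk with rfl | ⟨g, _, _, hin⟩
            · exact hs.1
            · exact hin
          have hcemp : ctEmp board size c := ⟨hcin, hcval⟩
          have hcreach : ctReach board size s c := by
            rcases hcstk with rfl | ⟨g, hg, hnb, _⟩
            · exact Relation.ReflTransGen.refl
            · exact Relation.ReflTransGen.tail (hgrp g hg).2 ⟨(hgrp g hg).1, hcemp, hnb⟩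
          have hgadd : PySem.Set.add group c = group ++ [c] :=
            PySem.Set.add_of_not_mem hcnv.2
          have hvadd : PySem.Set.add visited c = visited ++ [c] :=
            PySem.Set.add_of_not_mem hcnv.1
          have hcnV0 : c ∉ V0 := fun h => hcnv.1 (by rw [hveq, List.mem_append]; exact Or.inl h)
          have hveq' : PySem.Set.add visited c = V0 ++ PySem.Set.add group c := by
            rw [hvadd, hgadd, hveq, List.append_assoc]
          -- membership in the push list
          have hpush : ∀ q, q ∈ (ctNbrsA c.1 c.2 size).filter
              (fun q => !(PySem.Set.contains (PySem.Set.add visited c) q) &&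
                        !(PySem.Set.contains (PySem.Set.add group c) q))
              ↔ (q ∈ ctNbrsB c.1 c.2 ∧ ctInG size q) ∧
                q ∉ PySem.Set.add visited c ∧ q ∉ PySem.Set.add group c := by
            intro q
            rw [List.mem_filter, ctNbrsA_mem]
            constructor
            · rintro ⟨ha, hb⟩
              rw [Bool.and_eq_true, Bool.not_eq_true', Bool.not_eq_true'] at hb
              refine ⟨ha, fun h => ?_, fun h => ?_⟩
              · rw [(ctContains_iff _ q).mpr h] at hb; exact absurd hb.1 (by simp)
              · rw [(ctContains_iff _ q).mpr h] at hb; exact absurd hb.2 (by simp)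
            · rintro ⟨ha, hb, hc2⟩
              refine ⟨ha, ?_⟩
              rw [Bool.and_eq_true, Bool.not_eq_true', Bool.not_eq_true']
              constructor
              · cases hcc : PySem.Set.contains (PySem.Set.add visited c) q
                · rfl
                · exact absurd ((ctContains_iff _ q).mp hcc) hb
              · cases hcc : PySem.Set.contains (PySem.Set.add group c) q
                · rfl
                · exact absurd ((ctContains_iff _ q).mp hcc) hc2
          have hgmem' : ∀ p, p ∈ PySem.Set.add group c ↔ p ∈ group ∨ p = c := by
            intro p; rw [hgadd]; simp
          have hvmem' : ∀ p, p ∈ PySem.Set.add visited c ↔ p ∈ visited ∨ p = c := by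
            intro p; rw [hvadd]; simp
          apply ih (PySem.Set.add visited c) (PySem.Set.add group c) colors
            (rest ++ (ctNbrsA c.1 c.2 size).filter
              (fun q => !(PySem.Set.contains (PySem.Set.add visited c) q) &&
                        !(PySem.Set.contains (PySem.Set.add group c) q)))
            hveq'
          · rw [hgadd]
            exact hgnd.append (List.nodup_singleton c)
              (fun x hx hx2 => by
                simp only [List.mem_singleton] at hx2; subst hx2; exact hcnv.2 hx)
          · intro p hp
            rcases (hgmem' p).mp hp with h | rfl
            · exact hgV0 p h
            · exact hcnV0
          · intro p hp
            rcases (hgmem' p).mp hp with h | rfl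
            · exact hgrp p h
            · exact ⟨hcemp, hcreach⟩
          · intro e he
            rcases List.mem_append.mp he with h | h
            · rcases hstk e (List.mem_append.mpr (Or.inl h)) with h' | ⟨g, hg, hnb, hin⟩
              · exact Or.inl h'
              · exact Or.inr ⟨g, (hgmem' g).mpr (Or.inl hg), hnb, hin⟩
            · obtain ⟨⟨hnb, hin⟩, _, _⟩ := (hpush e).mp h
              exact Or.inr ⟨c, (hgmem' c).mpr (Or.inr rfl), hnb, hin⟩
          · intro g hg q hq
            rcases (hgmem' g).mp hg with hgold | hgc
            · rcases hcl g hgold q hq with h | h | h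
              · exact Or.inl h
              · exact Or.inr (Or.inl ((hgmem' q).mpr (Or.inl h)))
              · rcases List.mem_append.mp h with h | h
                · exact Or.inr (Or.inr (List.mem_append.mpr (Or.inl h)))
                · simp only [List.mem_singleton] at h
                  subst h
                  exact Or.inr (Or.inl ((hgmem' q).mpr (Or.inr rfl)))
            · -- g = c: its empty neighbours are pushed or already recorded
              rw [hgc] at hq
              obtain ⟨_, hqemp, hqnb⟩ := hq
              by_cases hqv : q ∈ PySem.Set.add visited c
              · rcases (hvmem' q).mp hqv with h | rfl
                · rw [hveq, List.mem_append] at h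
                  rcases h with h | h
                  · exact Or.inl h
                  · exact Or.inr (Or.inl ((hgmem' q).mpr (Or.inl h)))
                · exact Or.inr (Or.inl ((hgmem' q).mpr (Or.inr rfl)))
              · by_cases hqg : q ∈ PySem.Set.add group c
                · exact Or.inr (Or.inl hqg)
                · refine Or.inr (Or.inr (List.mem_append.mpr (Or.inr ?_)))
                  exact (hpush q).mpr ⟨⟨hqnb, hqemp.1⟩, hqv, hqg⟩
          · intro v hv
            obtain ⟨g, hg, hrest⟩ := hcolS v hv
            exact ⟨g, (hgmem' g).mpr (Or.inl hg), hrest⟩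
          · intro g hg r hr hrin hrne
            rcases (hgmem' g).mp hg with hgold | hgc
            · rcases hcolC g hgold r hr hrin hrne with h | h
              · exact Or.inl h
              · rcases List.mem_append.mp h with h | h
                · exact Or.inr (List.mem_append.mpr (Or.inl h))
                · simp only [List.mem_singleton] at h
                  subst h
                  exact absurd hcval hrne
            · -- g = c: stone neighbours of c are pushed
              rw [hgc] at hr
              have hrv : r ∉ PySem.Set.add visited c := by
                intro h
                rcases (hvmem' r).mp h with h' | rfl
                · exact hrne (hvemp r h').2
                · exact hrne hcval
              have hrg : r ∉ PySem.Set.add group c := by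
                intro h
                rcases (hgmem' r).mp h with h' | rfl
                · exact hrne (hgrp r h').1.2
                · exact hrne hcval
              refine Or.inr (List.mem_append.mpr (Or.inr ?_))
              exact (hpush r).mpr ⟨⟨hr, hrin⟩, hrv, hrg⟩
          · rcases hsg with h | h
            · exact Or.inl ((hgmem' s).mpr (Or.inl h))
            · rcases List.mem_append.mp h with h | h
              · exact Or.inr (List.mem_append.mpr (Or.inl h))
              · simp only [List.mem_singleton] at h
                exact Or.inl ((hgmem' s).mpr (Or.inr h))
          · exact hcnd
          · -- the measure drops: c leaves the free set, at most 4 cells are pushed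
            have hcfree : c ∈ (ctGrid size).filter
                (fun p => ctEmptyB board size p = true ∧ p ∉ V0 ∧ p ∉ group) := by
              rw [Finset.mem_filter, ctGrid_mem]
              exact ⟨hcin, (ctEmptyB_iff board size c).mpr hcemp, hcnV0, hcnv.2⟩
            have hfeq : (ctGrid size).filter
                (fun p => ctEmptyB board size p = true ∧ p ∉ V0 ∧ p ∉ PySem.Set.add group c)
                = ((ctGrid size).filter
                    (fun p => ctEmptyB board size p = true ∧ p ∉ V0 ∧ p ∉ group)).erase c := by
              ext p
              rw [Finset.mem_erase, Finset.mem_filter, Finset.mem_filter]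
              constructor
              · rintro ⟨hpg, hpe, hpV, hpgr⟩
                have hpc : p ≠ c := fun h => hpgr ((hgmem' p).mpr (Or.inr h))
                exact ⟨hpc, hpg, hpe, hpV, fun h => hpgr ((hgmem' p).mpr (Or.inl h))⟩
              · rintro ⟨hpc, hpg, hpe, hpV, hpgr⟩
                refine ⟨hpg, hpe, hpV, fun h => ?_⟩
                rcases (hgmem' p).mp h with h' | h'
                · exact hpgr h'
                · exact hpc h'
            have hcard' := Finset.card_erase_of_mem hcfree
            rw [hfeq, hcard']
            have hplen : ((ctNbrsA c.1 c.2 size).filter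
                (fun q => !(PySem.Set.contains (PySem.Set.add visited c) q) &&
                          !(PySem.Set.contains (PySem.Set.add group c) q))).length ≤ 4 :=
              le_trans (List.length_filter_le _ _) (ctNbrsA_len c.1 c.2 size)
            have hcpos : 0 < ((ctGrid size).filter
                (fun p => ctEmptyB board size p = true ∧ p ∉ V0 ∧ p ∉ group)).card :=
              Finset.card_pos.mpr ⟨c, hcfree⟩
            simp only [List.length_append, List.length_singleton] at hmu ⊢
            omega

-- ===== outer loops =====

theorem ctSetLen {α : Type} (s : PySem.Set α) : PySem.Set.len s = (s.length : Int) := rfl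

theorem ctCnt_append (board : List (List Int)) (size : Int) (c : Int)
    (l1 l2 : List (Int × Int)) :
    ctCnt board size c (l1 ++ l2) = ctCnt board size c l1 + ctCnt board size c l2 := by
  unfold ctCnt
  exact List.countP_append ..

theorem ctCnt_all (board : List (List Int)) (size : Int) (c : Int) (l : List (Int × Int))
    (h : ∀ p ∈ l, ctMono board size p c) : ctCnt board size c l = l.length := by
  unfold ctCnt
  exact List.countP_eq_length.mpr (fun p hp => ctIndic_true (h p hp))

theorem ctCnt_none (board : List (List Int)) (size : Int) (c : Int) (l : List (Int × Int))
    (h : ∀ p ∈ l, ¬ ctMono board size p c) : ctCnt board size c l = 0 := by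
  unfold ctCnt
  exact List.countP_eq_zero.mpr (fun p hp => by rw [ctIndic_false (h p hp)]; simp)

theorem ctFree_le (board : List (List Int)) (size : Int) (V G : List (Int × Int)) :
    ((ctGrid size).filter (fun p => ctEmptyB board size p = true ∧ p ∉ V ∧ p ∉ G)).card
      ≤ size.toNat * size.toNat := by
  rw [← ctGrid_card size]
  exact Finset.card_le_card (Finset.filter_subset _ _)

theorem ctALoop (board : List (List Int)) (size : Int) (rs : List (Int × Int))
    (hin : ∀ p ∈ rs, ctInG size p) :
    ∀ (V : PySem.Set (Int × Int)) (b w : Int),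
    V.Nodup → (∀ p ∈ V, ctEmp board size p) →
    (∀ p ∈ V, ∀ q, ctStep board size p q → q ∈ V) →
    ∃ ext,
      (rs.foldl (fun st p =>
        if !(ctVal board p.1 p.2 == 0) || PySem.Set.contains st.1 (p.1, p.2) then st
        else
          let r := ctBFS board size (5 * (size.toNat * size.toNat) + 2) st.1
                     PySem.Set.empty PySem.Set.empty [(p.1, p.2)]
          if PySem.Set.equal r.2.1 [1] then (r.2.2, st.2.1 + PySem.Set.len r.1, st.2.2)
          else if PySem.Set.equal r.2.1 [2] then (r.2.2, st.2.1, st.2.2 + PySem.Set.len r.1)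
          else (r.2.2, st.2.1, st.2.2)) (V, b, w))
      = (V ++ ext, b + (ctCnt board size 1 ext : Int), w + (ctCnt board size 2 ext : Int)) ∧
      (V ++ ext).Nodup ∧ (∀ p ∈ ext, ctEmp board size p) ∧
      (∀ p ∈ V ++ ext, ∀ q, ctStep board size p q → q ∈ V ++ ext) ∧
      (∀ p ∈ rs, ctEmp board size p → p ∈ V ++ ext) := by
  induction rs with
  | nil =>
    intro V b w hnd hemp hcl
    exact ⟨[], by simp [ctCnt], by simpa using hnd, by simp, by simpa using hcl, by simp⟩
  | cons p rs ih =>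
    intro V b w hnd hemp hcl
    have hin' : ∀ q ∈ rs, ctInG size q := fun q hq => hin q (List.mem_cons_of_mem p hq)
    have hpin : ctInG size p := hin p List.mem_cons_self
    simp only [List.foldl_cons]
    by_cases hcond : (!(ctVal board p.1 p.2 == 0) || PySem.Set.contains V (p.1, p.2)) = true
    · rw [if_pos hcond]
      obtain ⟨ext, hres, hnd2, hemp2, hcl2, hmem2⟩ := ih hin' V b w hnd hemp hcl
      refine ⟨ext, hres, hnd2, hemp2, hcl2, ?_⟩
      intro q hq hqe
      rcases List.mem_cons.mp hq with rfl | hq'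
      · rcases Bool.or_eq_true_iff.mp hcond with h | h
        · rw [Bool.not_eq_true', beq_eq_false_iff_ne] at h
          exact absurd hqe.2 h
        · have : (q.1, q.2) ∈ V := (ctContains_iff V (q.1, q.2)).mp h
          exact List.mem_append.mpr (Or.inl (by simpa using this))
      · exact hmem2 q hq' hqe
    · rw [if_neg hcond]
      have hpval : ctVal board p.1 p.2 = 0 := by
        by_contra h
        exact hcond (Bool.or_eq_true_iff.mpr (Or.inl (by simpa using h)))
      have hpe : ctEmp board size p := ⟨hpin, hpval⟩
      have hpV : p ∉ V := by
        intro h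
        exact hcond (Bool.or_eq_true_iff.mpr (Or.inr ((ctContains_iff V (p.1, p.2)).mpr
          (by simpa using h))))
      have hbfs := ctBFS_spec board size p V hpe hpV hemp hcl
        (5 * (size.toNat * size.toNat) + 2) V PySem.Set.empty PySem.Set.empty [(p.1, p.2)]
        (by simp [PySem.Set.empty])
        List.nodup_nil (by simp [PySem.Set.empty]) (by simp [PySem.Set.empty])
        (by intro e he; simp at he; exact Or.inl (by rw [he]))
        (by simp [PySem.Set.empty]) (by simp [PySem.Set.empty]) (by simp [PySem.Set.empty])
        (Or.inr (by simp)) List.nodup_nil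
        (by
          have := ctFree_le board size V PySem.Set.empty
          simp only [List.length_singleton]
          omega)
      set r := ctBFS board size (5 * (size.toNat * size.toNat) + 2) V
        PySem.Set.empty PySem.Set.empty [(p.1, p.2)] with hr
      obtain ⟨hveq, hgnd, hgmem, hcmem⟩ := hbfs
      -- the new visited set V ++ r.1 satisfies the outer invariants
      have hgdisj : ∀ x ∈ r.1, x ∉ V := by
        intro x hx
        exact ctReach_not_mem_closed hcl hpV ((hgmem x).mp hx)
      have hnd' : (V ++ r.1).Nodup :=
        hnd.append hgnd (fun x hx hx2 => hgdisj x hx2 hx)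
      have hemp' : ∀ q ∈ V ++ r.1, ctEmp board size q := by
        intro q hq
        rcases List.mem_append.mp hq with h | h
        · exact hemp q h
        · exact ctReach_emp hpe ((hgmem q).mp h)
      have hcl' : ∀ x ∈ V ++ r.1, ∀ q, ctStep board size x q → q ∈ V ++ r.1 := by
        intro x hx q hq
        rcases List.mem_append.mp hx with h | h
        · exact List.mem_append.mpr (Or.inl (hcl x h q hq))
        · exact List.mem_append.mpr (Or.inr ((hgmem q).mpr
            (Relation.ReflTransGen.tail ((hgmem x).mp h) hq)))
      have hgm1 : ∀ x ∈ r.1, (ctMono board size x 1 ↔ ctMono board size p 1) :=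
        fun x hx => (ctMono_congr ((hgmem x).mp hx) 1).symm
      have hgm2 : ∀ x ∈ r.1, (ctMono board size x 2 ↔ ctMono board size p 2) :=
        fun x hx => (ctMono_congr ((hgmem x).mp hx) 2).symm
      have heq1 : (PySem.Set.equal r.2.1 [1]) = true ↔ ctMono board size p 1 :=
        ctEqual_one_iff 1 r.2.1 hcmem
      have heq2 : (PySem.Set.equal r.2.1 [2]) = true ↔ ctMono board size p 2 :=
        ctEqual_one_iff 2 r.2.1 hcmem
      have hppr : p ∈ r.1 := (hgmem p).mpr Relation.ReflTransGen.refl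
      by_cases hm1 : ctMono board size p 1
      · rw [if_pos (heq1.mpr hm1)]
        rw [hveq]
        obtain ⟨ext, hres, hnd2, hemp2, hcl2, hmem2⟩ :=
          ih hin' (V ++ r.1) (b + PySem.Set.len r.1) w hnd' hemp' hcl'
        refine ⟨r.1 ++ ext, ?_, ?_, ?_, ?_, ?_⟩
        · rw [hres, ctSetLen, ctCnt_append, ctCnt_append,
            ctCnt_all board size 1 r.1 (fun x hx => (hgm1 x hx).mpr hm1),
            ctCnt_none board size 2 r.1 (fun x hx h2 =>
              ctMono_not_both hm1 ((hgm2 x hx).mp h2)),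
            ← List.append_assoc]
          simp only [Prod.mk.injEq]
          refine ⟨trivial, by push_cast; ring, by push_cast; ring⟩
        · rw [← List.append_assoc]; exact hnd2
        · intro q hq
          rcases List.mem_append.mp hq with h | h
          · exact ctReach_emp hpe ((hgmem q).mp h)
          · exact hemp2 q h
        · rw [← List.append_assoc]; exact hcl2
        · intro q hq hqe
          rw [← List.append_assoc]
          rcases List.mem_cons.mp hq with rfl | hq'
          · exact List.mem_append.mpr (Or.inl (List.mem_append.mpr (Or.inr hppr)))
          · exact hmem2 q hq' hqe
      · rw [if_neg (by rw [Bool.not_eq_true]; exact (Bool.eq_false_iff.mpr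
          (fun h => hm1 (heq1.mp h))))]
        by_cases hm2 : ctMono board size p 2
        · rw [if_pos (heq2.mpr hm2)]
          rw [hveq]
          obtain ⟨ext, hres, hnd2, hemp2, hcl2, hmem2⟩ :=
            ih hin' (V ++ r.1) b (w + PySem.Set.len r.1) hnd' hemp' hcl'
          refine ⟨r.1 ++ ext, ?_, ?_, ?_, ?_, ?_⟩
          · rw [hres, ctSetLen, ctCnt_append, ctCnt_append,
              ctCnt_all board size 2 r.1 (fun x hx => (hgm2 x hx).mpr hm2),
              ctCnt_none board size 1 r.1 (fun x hx h1 =>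
                ctMono_not_both ((hgm1 x hx).mp h1) hm2),
              ← List.append_assoc]
            simp only [Prod.mk.injEq]
            refine ⟨trivial, by push_cast; ring, by push_cast; ring⟩
          · rw [← List.append_assoc]; exact hnd2
          · intro q hq
            rcases List.mem_append.mp hq with h | h
            · exact ctReach_emp hpe ((hgmem q).mp h)
            · exact hemp2 q h
          · rw [← List.append_assoc]; exact hcl2
          · intro q hq hqe
            rw [← List.append_assoc]
            rcases List.mem_cons.mp hq with rfl | hq'
            · exact List.mem_append.mpr (Or.inl (List.mem_append.mpr (Or.inr hppr)))
            · exact hmem2 q hq' hqe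
        · rw [if_neg (by rw [Bool.not_eq_true]; exact (Bool.eq_false_iff.mpr
            (fun h => hm2 (heq2.mp h))))]
          rw [hveq]
          obtain ⟨ext, hres, hnd2, hemp2, hcl2, hmem2⟩ :=
            ih hin' (V ++ r.1) b w hnd' hemp' hcl'
          refine ⟨r.1 ++ ext, ?_, ?_, ?_, ?_, ?_⟩
          · rw [hres, ctCnt_append, ctCnt_append,
              ctCnt_none board size 1 r.1 (fun x hx h1 => hm1 ((hgm1 x hx).mp h1)),
              ctCnt_none board size 2 r.1 (fun x hx h2 => hm2 ((hgm2 x hx).mp h2)),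
              ← List.append_assoc]
            simp only [Prod.mk.injEq]
            refine ⟨trivial, by push_cast; ring, by push_cast; ring⟩
          · rw [← List.append_assoc]; exact hnd2
          · intro q hq
            rcases List.mem_append.mp hq with h | h
            · exact ctReach_emp hpe ((hgmem q).mp h)
            · exact hemp2 q h
          · rw [← List.append_assoc]; exact hcl2
          · intro q hq hqe
            rw [← List.append_assoc]
            rcases List.mem_cons.mp hq with rfl | hq'
            · exact List.mem_append.mpr (Or.inl (List.mem_append.mpr (Or.inr hppr)))
            · exact hmem2 q hq' hqe

theorem ctCntE_cons_of (board : List (List Int)) (size : Int) (c : Int) (p : Int × Int)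
    (l : List (Int × Int)) (h : ctEmp board size p ∧ ctMono board size p c) :
    ctCntE board size c (p :: l) = ctCntE board size c l + 1 := by
  unfold ctCntE
  rw [List.countP_cons, ctIndic_true h]
  simp

theorem ctCntE_cons_not (board : List (List Int)) (size : Int) (c : Int) (p : Int × Int)
    (l : List (Int × Int)) (h : ¬ (ctEmp board size p ∧ ctMono board size p c)) :
    ctCntE board size c (p :: l) = ctCntE board size c l := by
  unfold ctCntE
  rw [List.countP_cons, ctIndic_false h]
  simp

theorem ctBLoop (board : List (List Int)) (size : Int) (rs : List (Int × Int))
    (hin : ∀ p ∈ rs, ctInG size p) :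
    ∀ (b w : Int),
    (rs.foldl (fun st p =>
      if !(ctValB board p.1 p.2 == 0) then st
      else
        let reg := ctGrow board size (size.toNat * size.toNat + 1) [(p.1, p.2)] [(p.1, p.2)]
        let colors : PySem.Set Int := reg.foldl (fun cs c =>
          (ctNbrsB c.1 c.2).foldl (fun cs q =>
            if decide (0 ≤ q.1) && decide (q.1 < size) && decide (0 ≤ q.2) &&
                 decide (q.2 < size) && !(ctValB board q.1 q.2 == 0)
            then PySem.Set.add cs (ctValB board q.1 q.2) else cs) cs) PySem.Set.empty
        if PySem.Set.equal colors [1] then (st.1 + 1, st.2)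
        else if PySem.Set.equal colors [2] then (st.1, st.2 + 1)
        else st) (b, w))
    = (b + (ctCntE board size 1 rs : Int), w + (ctCntE board size 2 rs : Int)) := by
  induction rs with
  | nil => intro b w; simp [ctCntE]
  | cons p rs ih =>
    intro b w
    have hin' : ∀ q ∈ rs, ctInG size q := fun q hq => hin q (List.mem_cons_of_mem p hq)
    have hpin : ctInG size p := hin p List.mem_cons_self
    simp only [List.foldl_cons]
    by_cases hval : (!(ctValB board p.1 p.2 == 0)) = true
    · rw [if_pos hval]
      have hne : ctVal board p.1 p.2 ≠ 0 := by simpa [ctValB_eq] using hval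
      rw [ih hin' b w,
        ctCntE_cons_not board size 1 p rs (fun h => hne h.1.2),
        ctCntE_cons_not board size 2 p rs (fun h => hne h.1.2)]
    · rw [if_neg hval]
      have hpval : ctVal board p.1 p.2 = 0 := by simpa [ctValB_eq] using hval
      have hpe : ctEmp board size p := ⟨hpin, hpval⟩
      have hgrow := ctGrow_spec board size p hpe (size.toNat * size.toNat + 1)
        [(p.1, p.2)] [(p.1, p.2)]
        (List.nodup_singleton _)
        (by intro q hq; simp at hq; rw [hq]; exact Relation.ReflTransGen.refl)
        (by simp)
        (fun q hq => hq)
        (by intro g hg hng q hq; exact absurd hg hng)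
        (by
          have hle : ((ctGrid size).filter (fun q => ctEmptyB board size q = true ∧
              q ∉ ([(p.1, p.2)] : PySem.Set (Int × Int)))).card ≤ size.toNat * size.toNat := by
            rw [← ctGrid_card size]
            exact Finset.card_le_card (Finset.filter_subset _ _)
          omega)
      obtain ⟨hregnd, hregmem⟩ := hgrow
      obtain ⟨hcnd, hcmem⟩ := ctColors_spec board size
        (ctGrow board size (size.toNat * size.toNat + 1) [(p.1, p.2)] [(p.1, p.2)])
        PySem.Set.empty List.nodup_nil
      have hcol : ∀ v, v ∈ ((ctGrow board size (size.toNat * size.toNat + 1)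
            [(p.1, p.2)] [(p.1, p.2)]).foldl (fun cs c =>
          (ctNbrsB c.1 c.2).foldl (fun cs q =>
            if decide (0 ≤ q.1) && decide (q.1 < size) && decide (0 ≤ q.2) &&
                 decide (q.2 < size) && !(ctValB board q.1 q.2 == 0)
            then PySem.Set.add cs (ctValB board q.1 q.2) else cs) cs) PySem.Set.empty)
          ↔ ctAdjCol board size p v := by
        intro v
        rw [hcmem v]
        constructor
        · rintro (h | ⟨c, hc, r, hr, hrin, hrne, hrv⟩)
          · simp [PySem.Set.empty] at h
          · exact ⟨c, (hregmem c).mp hc, r, hr, hrin, hrne, hrv⟩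
        · rintro ⟨g, hg, r, hr, hrin, hrne, hrv⟩
          exact Or.inr ⟨g, (hregmem g).mpr hg, r, hr, hrin, hrne, hrv⟩
      have heq1 := ctEqual_one_iff (board := board) (size := size) (s := p) 1 _ hcol
      have heq2 := ctEqual_one_iff (board := board) (size := size) (s := p) 2 _ hcol
      by_cases hm1 : ctMono board size p 1
      · rw [if_pos (heq1.mpr hm1), ih hin' (b + 1) w,
          ctCntE_cons_of board size 1 p rs ⟨hpe, hm1⟩,
          ctCntE_cons_not board size 2 p rs (fun h => ctMono_not_both hm1 h.2)]
        simp only [Prod.mk.injEq]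
        constructor <;> push_cast <;> ring
      · rw [if_neg (fun h => hm1 (heq1.mp h))]
        by_cases hm2 : ctMono board size p 2
        · rw [if_pos (heq2.mpr hm2), ih hin' b (w + 1),
            ctCntE_cons_not board size 1 p rs (fun h => ctMono_not_both h.2 hm2),
            ctCntE_cons_of board size 2 p rs ⟨hpe, hm2⟩]
          simp only [Prod.mk.injEq]
          constructor <;> push_cast <;> ring
        · rw [if_neg (fun h => hm2 (heq2.mp h)), ih hin' b w,
            ctCntE_cons_not board size 1 p rs (fun h => hm1 h.2),
            ctCntE_cons_not board size 2 p rs (fun h => hm2 h.2)]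

theorem ctCnt_final (board : List (List Int)) (size : Int) (ext : List (Int × Int)) (c : Int)
    (hnd : ext.Nodup) (hemp : ∀ p ∈ ext, ctEmp board size p)
    (hall : ∀ p, ctEmp board size p → p ∈ ext) :
    ctCnt board size c ext = ctCntE board size c (ctScan size) := by
  have hperm : ext.Perm ((ctScan size).filter (fun p => ctIndic (ctEmp board size p))) := by
    rw [List.perm_ext_iff_of_nodup hnd ((ctScan_nodup size).filter _)]
    intro p
    rw [List.mem_filter]
    constructor
    · intro hp
      exact ⟨(ctScan_mem size p).mpr (hemp p hp).1, ctIndic_true (hemp p hp)⟩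
    · rintro ⟨hps, hpe⟩
      exact hall p ((ctIndic_iff _).mp hpe)
  unfold ctCnt ctCntE
  rw [hperm.countP_eq, List.countP_filter]
  apply List.countP_congr
  intro p _
  simp only [Bool.and_eq_true, ctIndic_iff]
  tauto

-- ===== VERDICT (by name: the statement is the Claim_ definition above) =====
theorem count_territory_spec : Claim_equal_count_territory := by
  intro board size _ _
  unfold Spec_count_territory count_territory count_territory_alt
  rw [ctScan_eq size (fun st x y =>
    if !(ctVal board x y == 0) || PySem.Set.contains st.1 (x, y) then st
    else
      let r := ctBFS board size (5 * (size.toNat * size.toNat) + 2) st.1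
                 PySem.Set.empty PySem.Set.empty [(x, y)]
      if PySem.Set.equal r.2.1 [1] then (r.2.2, st.2.1 + PySem.Set.len r.1, st.2.2)
      else if PySem.Set.equal r.2.1 [2] then (r.2.2, st.2.1, st.2.2 + PySem.Set.len r.1)
      else (r.2.2, st.2.1, st.2.2)) (PySem.Set.empty, (0 : Int), (0 : Int))]
  rw [ctScan_eq size (fun st x y =>
    if !(ctValB board x y == 0) then st
    else
      let reg := ctGrow board size (size.toNat * size.toNat + 1) [(x, y)] [(x, y)]
      let colors : PySem.Set Int := reg.foldl (fun cs c =>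
        (ctNbrsB c.1 c.2).foldl (fun cs q =>
          if decide (0 ≤ q.1) && decide (q.1 < size) && decide (0 ≤ q.2) &&
               decide (q.2 < size) && !(ctValB board q.1 q.2 == 0)
          then PySem.Set.add cs (ctValB board q.1 q.2) else cs) cs) PySem.Set.empty
      if PySem.Set.equal colors [1] then (st.1 + 1, st.2)
      else if PySem.Set.equal colors [2] then (st.1, st.2 + 1)
      else st) ((0 : Int), (0 : Int))]
  have hin : ∀ p ∈ ctScan size, ctInG size p := fun p hp => (ctScan_mem size p).mp hp
  obtain ⟨ext, hres, hnd, hempext, _, hmemext⟩ :=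
    ctALoop board size (ctScan size) hin PySem.Set.empty 0 0 List.nodup_nil
      (by intro p hp; simp [PySem.Set.empty] at hp) (by intro p hp; simp [PySem.Set.empty] at hp)
  rw [ctBLoop board size (ctScan size) hin 0 0]
  rw [hres]
  have hextnd : ext.Nodup := by simpa [PySem.Set.empty] using hnd
  have hall : ∀ p, ctEmp board size p → p ∈ ext := by
    intro p hp
    have := hmemext p ((ctScan_mem size p).mpr hp.1) hp
    simpa [PySem.Set.empty] using this
  rw [ctCnt_final board size ext 1 hextnd hempext hall,
    ctCnt_final board size ext 2 hextnd hempext hall]
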